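-- pv_equiv track=rewrite | github.com/aarneranta/gf-math | data/100_theorems/translatex.py | unlex
-- ===== SOURCE A (Python) =====
-- def unlex(s):
--     ss = s.split()
--     ss[0] = ss[0].capitalize()
--     for i in range(1, len(ss)):
--         if ss[i][-1] == '.' and ss[(i+1):]:
--             ss[i+1] = ss[i+1].capitalize()
--     r = ' '.join(ss)
--     r = r.replace(' .', '.')
--     r = r.replace(' ,', ',')
--     return r
-- ===== SOURCE B (Python) =====
-- def unlex(s):
--     ss = s.split()
--     out = [ss[0].capitalize()]          # IndexError on whitespace-only input, like A
--     for i in range(1, len(ss)):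
--         t = ss[i].capitalize() if i >= 2 and ss[i - 1].endswith('.') else ss[i]
--         if t[0] not in '.,':
--             out.append(' ')
--         out.append(t)
--     return ''.join(out)
-- ===== Notes on version B (the rewrite author's own statement) =====
-- stated objective: alternative
-- what changed: B builds the output in a single left-to-right pass over the tokens (capitalizing a token on the fly when the previous token ends in '.', and prepending a space unless the token starts with '.' or ','), instead of A's four phases: mutate the token list in place, join with spaces, then two global string replaces.
import Mathlib
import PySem

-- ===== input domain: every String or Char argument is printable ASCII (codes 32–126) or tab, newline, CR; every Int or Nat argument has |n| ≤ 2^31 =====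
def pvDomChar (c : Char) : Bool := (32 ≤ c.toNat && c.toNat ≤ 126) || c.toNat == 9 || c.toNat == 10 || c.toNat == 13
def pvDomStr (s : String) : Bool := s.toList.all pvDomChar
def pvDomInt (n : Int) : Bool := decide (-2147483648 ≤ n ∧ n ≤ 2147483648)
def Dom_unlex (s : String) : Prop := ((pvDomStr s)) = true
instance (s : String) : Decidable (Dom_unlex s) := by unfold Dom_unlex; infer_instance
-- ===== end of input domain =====

-- B rebuilds the result in one left-to-right pass (capitalize-on-the-fly, space dropped before '.'/',')
-- instead of A's mutate-list + join + two global replaces; objective: alternative decomposition, same cost.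

-- ===== PORT A =====

-- str.capitalize(): first char uppercased, rest lowercased (exact on the ASCII domain)
def pvCap : List Char → List Char
  | [] => []
  | c :: cs => PySem.Chars.upperChar c :: PySem.Chars.lower cs

-- body of A's for-loop at index i (i ∈ range(1, len(l)), so the `none` arms are unreachable:
-- split() tokens are nonempty and the indices are in range)
def unlexStepA (l : List (List Char)) (i : Int) : List (List Char) :=
  match PySem.List.pyGet? l i with
  | none => l
  | some ti =>
    match PySem.List.pyGet? ti (-1) with                     -- ss[i][-1]
    | none => l
    | some c =>
      if c = '.' ∧ PySem.List.slice l (some (i + 1)) none ≠ [] then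
        match PySem.List.pyGet? l (i + 1) with
        | none => l
        | some t1 => l.set (i + 1).toNat (pvCap t1)          -- ss[i+1] = ss[i+1].capitalize()
      else l

def unlex (s : String) : String :=
  let ss := PySem.Chars.split₀ s.toList
  match PySem.List.pyGet? ss 0 with
  | none => ""                                               -- Python raises IndexError (excluded by Pre_)
  | some t0 =>
    let ss1 := ss.set 0 (pvCap t0)                           -- ss[0] = ss[0].capitalize()
    let ss2 := (PySem.List.pyRange 1 (ss1.length : Int) 1).foldl unlexStepA ss1
    let r1 := PySem.Chars.join [' '] ss2                     -- ' '.join(ss)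
    let r2 := PySem.Chars.replace r1 [' ', '.'] ['.']        -- r.replace(' .', '.')
    let r3 := PySem.Chars.replace r2 [' ', ','] [',']        -- r.replace(' ,', ',')
    String.ofList r3

-- ===== PORT B =====

-- ss[i] for an index the loop keeps in range (the [] default is unreachable)
def pvTok (ss : List (List Char)) (i : Int) : List Char := (PySem.List.pyGet? ss i).getD []

-- body of B's loop at index i: pick the (possibly recapitalized) token, prepend ' ' unless it starts with '.'/','
def unlexStepB (ss : List (List Char)) (out : List (List Char)) (i : Int) : List (List Char) :=
  let t := if 2 ≤ i ∧ PySem.Chars.endswith (pvTok ss (i - 1)) ['.'] then pvCap (pvTok ss i) else pvTok ss i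
  match PySem.List.pyGet? t 0 with                           -- t[0] (tokens are nonempty)
  | none => out
  | some c => (if c = '.' ∨ c = ',' then out else out ++ [[' ']]) ++ [t]

def unlex_alt (s : String) : String :=
  match PySem.Chars.split₀ s.toList with
  | [] => ""                                                 -- Python raises IndexError (excluded by Pre_)
  | t0 :: ts =>
    let ss := t0 :: ts
    let out := (PySem.List.pyRange 1 (ss.length : Int) 1).foldl (unlexStepB ss) [pvCap t0]
    String.ofList (PySem.Chars.join [] out)                      -- ''.join(out)

-- ===== PRECONDITION & SPEC =====

-- A (and B) raise IndexError on ss[0] when s.split() is empty, i.e. on whitespace-only strings.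
def Pre_unlex (s : String) : Prop := PySem.Str.split₀ s ≠ []
instance (s : String) : Decidable (Pre_unlex s) := by unfold Pre_unlex; infer_instance

def pvWitness_unlex : String := "turing a. machine, halts ."

def Spec_unlex (s : String) (out : String) : Prop := out = unlex_alt s
instance (s : String) (out : String) : Decidable (Spec_unlex s out) := by unfold Spec_unlex; infer_instance

-- ===== CLAIM (what is proved, stated in full; the proofs are below) =====
def Claim_equal_unlex : Prop := ∀ (s : String), Dom_unlex s → Pre_unlex s → Spec_unlex s (unlex s)

-- ===== LEMMAS AND PROOFS =====

-- the token list with A's recapitalization rule applied, described per index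
def normTok (ss : List (List Char)) (j : Nat) : List Char :=
  if j = 0 then pvCap (ss.getD 0 [])
  else if 2 ≤ j ∧ PySem.Chars.endswith (ss.getD (j - 1) []) ['.'] then pvCap (ss.getD j []) else ss.getD j []

-- the final text contributed by a non-first token u: u preceded by ' ' unless u starts with '.' or ','
def pvPiece (u : List Char) : List Char :=
  (if u.head? = some '.' ∨ u.head? = some ',' then [] else [' ']) ++ u

-- A's list after loop iterations 1..k: positions ≤ k+1 normalized, the rest original
def pvPartial (ss : List (List Char)) (k : Nat) : List (List Char) :=
  (List.range ss.length).map (fun j => if j ≤ k + 1 then normTok ss j else ss.getD j [])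

-- tokens are nonempty and contain no space
def pvGood (u : List Char) : Prop := u ≠ [] ∧ ∀ c ∈ u, c ≠ ' '


theorem pvChar_le_iff (c d : Char) : c ≤ d ↔ c.toNat ≤ d.toNat :=
  ⟨fun h => Fin.mk_le_mk.mp h, fun h => Fin.mk_le_mk.mpr h⟩

theorem pvToNat_ofNat (n : Nat) (h : n < 55296) : (Char.ofNat n).toNat = n := by
  simp [Char.toNat_ofNat, Nat.isValidChar, h]

-- lowerChar / upperChar fix every character whose code is below 'A', and never produce one
theorem pvLowerChar_eq_iff (c d : Char) (hd : d.toNat < 65) : PySem.Chars.lowerChar c = d ↔ c = d := by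
  unfold PySem.Chars.lowerChar
  split
  · rename_i h
    unfold PySem.Chars.isupper at h
    simp only [Bool.and_eq_true, decide_eq_true_eq, pvChar_le_iff] at h
    have h1 : (65:Nat) ≤ c.toNat := h.1
    have h2 : c.toNat ≤ 90 := h.2
    have hv : c.toNat + 32 < 55296 := by omega
    constructor
    · intro he
      have : (Char.ofNat (c.toNat + 32)).toNat = d.toNat := by rw [he]
      rw [pvToNat_ofNat _ hv] at this; omega
    · intro he; subst he; omega
  · exact Iff.rfl

theorem pvUpperChar_eq_iff (c d : Char) (hd : d.toNat < 65) : PySem.Chars.upperChar c = d ↔ c = d := by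
  unfold PySem.Chars.upperChar
  split
  · rename_i h
    unfold PySem.Chars.islower at h
    simp only [Bool.and_eq_true, decide_eq_true_eq, pvChar_le_iff] at h
    have h1 : (97:Nat) ≤ c.toNat := h.1
    have h2 : c.toNat ≤ 122 := h.2
    have hv : c.toNat - 32 < 55296 := by omega
    constructor
    · intro he
      have : (Char.ofNat (c.toNat - 32)).toNat = d.toNat := by rw [he]
      rw [pvToNat_ofNat _ hv] at this; omega
    · intro he; subst he; omega
  · exact Iff.rfl

theorem pvCap_ne_nil {u : List Char} (h : u ≠ []) : pvCap u ≠ [] := by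
  cases u with
  | nil => exact absurd rfl h
  | cons c cs => simp [pvCap]

theorem pvCap_good {u : List Char} (h : pvGood u) : pvGood (pvCap u) := by
  obtain ⟨h1, h2⟩ := h
  refine ⟨pvCap_ne_nil h1, ?_⟩
  cases u with
  | nil => exact absurd rfl h1
  | cons c cs =>
    intro x hx
    simp only [pvCap, List.mem_cons] at hx
    rcases hx with hx | hx
    · subst hx
      intro he
      exact h2 c (by simp) ((pvUpperChar_eq_iff c ' ' (by decide)).mp he)
    · simp only [PySem.Chars.lower, List.mem_map] at hx
      obtain ⟨y, hy, he⟩ := hx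
      intro he2; subst he2
      exact h2 y (by simp [hy]) ((pvLowerChar_eq_iff y ' ' (by decide)).mp he)

theorem pvCap_getLast?_dot (u : List Char) : (pvCap u).getLast? = some '.' ↔ u.getLast? = some '.' := by
  cases u with
  | nil => simp [pvCap]
  | cons c cs =>
    cases cs with
    | nil => simp [pvCap, PySem.Chars.lower, pvUpperChar_eq_iff c '.' (by decide)]
    | cons d ds =>
      have hne : PySem.Chars.lower (d :: ds) ≠ [] := by simp [PySem.Chars.lower]
      have h1 : (pvCap (c :: d :: ds)).getLast? = (PySem.Chars.lower (d :: ds)).getLast? := by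
        show (PySem.Chars.upperChar c :: PySem.Chars.lower (d :: ds)).getLast? = _
        cases hl : PySem.Chars.lower (d :: ds) with
        | nil => exact absurd hl hne
        | cons b bs => exact List.getLast?_cons_cons ..
      rw [h1]
      have h2 : (c :: d :: ds).getLast? = (d :: ds).getLast? := List.getLast?_cons_cons ..
      rw [h2]
      simp only [PySem.Chars.lower, List.getLast?_map]
      cases hl : (d :: ds).getLast? with
      | none => simp at hl
      | some a => simp [pvLowerChar_eq_iff a '.' (by decide)]

-- endswith u ['.'] reads the last character
theorem pv_endswith_dot (u : List Char) : PySem.Chars.endswith u ['.'] = true ↔ u.getLast? = some '.' := by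
  rw [PySem.Chars.endswith_iff, List.getLast?_eq_some_iff]
  constructor
  · rintro ⟨t, ht⟩; exact ⟨t, ht.symm⟩
  · rintro ⟨t, ht⟩; exact ⟨t, ht.symm⟩


-- acc comes straight out
theorem pvGo_acc (old new : List Char) : ∀ (fuel : Nat) (l acc : List Char),
    PySem.Chars.replace.go old new fuel l acc = acc.reverse ++ PySem.Chars.replace.go old new fuel l [] := by
  intro fuel
  induction fuel with
  | zero => intro l acc; simp [PySem.Chars.replace.go]
  | succ f ih =>
    intro l acc
    cases l with
    | nil => simp [PySem.Chars.replace.go]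
    | cons c t =>
      simp only [PySem.Chars.replace.go]
      split
      · rw [ih _ (new.reverse ++ acc), ih _ (new.reverse ++ [])]
        simp
      · rw [ih _ (c :: acc), ih _ [c]]
        simp

-- enough fuel: the result does not depend on it
theorem pvGo_fuel (old new : List Char) (hold : old ≠ []) : ∀ (f1 : Nat) (f2 : Nat) (l : List Char),
    l.length ≤ f1 → l.length ≤ f2 →
    PySem.Chars.replace.go old new f1 l [] = PySem.Chars.replace.go old new f2 l [] := by
  intro f1
  induction f1 with
  | zero =>
    intro f2 l h1 h2
    have : l = [] := List.eq_nil_of_length_eq_zero (Nat.le_zero.mp h1)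
    subst this
    cases f2 <;> simp [PySem.Chars.replace.go]
  | succ f ih =>
    intro f2 l h1 h2
    cases l with
    | nil => cases f2 <;> simp [PySem.Chars.replace.go]
    | cons c t =>
      cases f2 with
      | zero => simp at h2
      | succ g =>
        simp only [PySem.Chars.replace.go]
        split
        · rename_i hp
          have hlen : old.length ≤ (c :: t).length := List.IsPrefix.length_le (List.isPrefixOf_iff_prefix.mp hp)
          have hlen1 : 1 ≤ old.length := by
            cases old with | nil => exact absurd rfl hold | cons => simp
          rw [pvGo_acc, pvGo_acc old new g]
          congr 1
          exact ih g _ (by simp at h1 ⊢; omega) (by simp at h2 ⊢; omega)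
        · rw [pvGo_acc, pvGo_acc old new g]
          congr 1
          exact ih g t (by simp at h1; omega) (by simp at h2; omega)

-- r.replace(' '+p, p) on our shapes
def pvRepl (p : Char) (l : List Char) : List Char := PySem.Chars.replace l [' ', p] [p]

theorem pvRepl_def (p : Char) (l : List Char) :
    pvRepl p l = PySem.Chars.replace.go [' ', p] [p] l.length l [] := by
  simp [pvRepl, PySem.Chars.replace]

theorem pvRepl_nil (p : Char) : pvRepl p [] = [] := by
  simp [pvRepl_def, PySem.Chars.replace.go]

theorem pvRepl_cons (p c : Char) (l : List Char) (h : c ≠ ' ') :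
    pvRepl p (c :: l) = c :: pvRepl p l := by
  rw [pvRepl_def]
  have hnp : [' ', p].isPrefixOf (c :: l) = false := by
    simp [List.isPrefixOf]
    intro h'; exact absurd h'.symm h
  simp only [List.length_cons, PySem.Chars.replace.go, hnp, Bool.false_eq_true, if_false]
  rw [pvGo_acc]
  rw [← pvRepl_def]
  rfl

theorem pvRepl_match (p : Char) (l : List Char) :
    pvRepl p (' ' :: p :: l) = p :: pvRepl p l := by
  rw [pvRepl_def]
  have hp : [' ', p].isPrefixOf (' ' :: p :: l) = true := by simp [List.isPrefixOf]
  simp only [List.length_cons, PySem.Chars.replace.go, hp, if_pos]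
  rw [pvGo_acc]
  simp only [List.length, List.drop]
  rw [pvGo_fuel [' ', p] [p] (by simp) (l.length + 1) l.length l (by omega) (le_refl _)]
  rw [← pvRepl_def]
  rfl

theorem pvRepl_sep_ne (p q : Char) (l : List Char) (h : q ≠ p) :
    pvRepl p (' ' :: q :: l) = ' ' :: pvRepl p (q :: l) := by
  rw [pvRepl_def]
  have hnp : [' ', p].isPrefixOf (' ' :: q :: l) = false := by
    simp [List.isPrefixOf]
    intro h'; exact absurd h'.symm h
  have h2 : pvRepl p (q :: l) = PySem.Chars.replace.go [' ', p] [p] (l.length + 1) (q :: l) [] := by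
    rw [pvRepl_def]; rfl
  rw [h2]
  simp only [List.length_cons, PySem.Chars.replace.go, hnp, Bool.false_eq_true, if_false]
  split
  · rw [pvGo_acc]
    rw [pvGo_acc _ _ _ _ ([p].reverse ++ [])]
    simp
  · rw [pvGo_acc]
    rw [pvGo_acc _ _ _ _ [q]]
    simp

theorem pvRepl_token (p : Char) (t rest : List Char) (h : ∀ c ∈ t, c ≠ ' ') :
    pvRepl p (t ++ rest) = t ++ pvRepl p rest := by
  induction t with
  | nil => simp
  | cons c cs ih =>
    simp only [List.cons_append]
    rw [pvRepl_cons p c _ (h c (by simp)), ih (fun c hc => h c (by simp [hc]))]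

theorem pvRepl_sep_token (p : Char) (u rest : List Char) (hg : pvGood u) :
    pvRepl p (' ' :: (u ++ rest)) =
      (if u.head? = some p then [] else [' ']) ++ u ++ pvRepl p rest := by
  obtain ⟨h1, h2⟩ := hg
  cases u with
  | nil => exact absurd rfl h1
  | cons v u' =>
    by_cases hv : v = p
    · subst hv
      simp only [List.cons_append, pvRepl_match, List.head?_cons]
      rw [pvRepl_token v u' rest (fun c hc => h2 c (by simp [hc]))]
      simp
    · simp only [List.cons_append, pvRepl_sep_ne p v _ hv, List.head?_cons]
      rw [pvRepl_cons p v _ (h2 v (by simp)), pvRepl_token p u' rest (fun c hc => h2 c (by simp [hc]))]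
      simp [hv]

-- joining with ' ' = first token ++ flatMap (' ' :: ·)
theorem pvJoin_space (t : List Char) (ts : List (List Char)) :
    PySem.Chars.join [' '] (t :: ts) = t ++ ts.flatMap (fun u => ' ' :: u) := by
  induction ts generalizing t with
  | nil => simp [PySem.Chars.join_singleton]
  | cons u us ih => rw [PySem.Chars.join_cons_cons, ih u]; simp

-- first replace pass over the separated tail
theorem pvPass1 (ts : List (List Char)) (hg : ∀ u ∈ ts, pvGood u) :
    pvRepl '.' (ts.flatMap (fun u => ' ' :: u)) =
      ts.flatMap (fun u => (if u.head? = some '.' then [] else [' ']) ++ u) := by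
  induction ts with
  | nil => simp [pvRepl_nil]
  | cons u us ih =>
    simp only [List.flatMap_cons]
    rw [show (' ' :: u ++ us.flatMap (fun u => ' ' :: u)) = ' ' :: (u ++ us.flatMap (fun u => ' ' :: u)) from rfl]
    rw [pvRepl_sep_token '.' u _ (hg u (by simp))]
    rw [ih (fun v hv => hg v (by simp [hv]))]

-- second replace pass
theorem pvPass2 (ts : List (List Char)) (hg : ∀ u ∈ ts, pvGood u) :
    pvRepl ',' (ts.flatMap (fun u => (if u.head? = some '.' then [] else [' ']) ++ u)) =
      ts.flatMap (fun u => (if u.head? = some '.' ∨ u.head? = some ',' then [] else [' ']) ++ u) := by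
  induction ts with
  | nil => simp [pvRepl_nil]
  | cons u us ih =>
    have hgu := hg u (by simp)
    have ihr := ih (fun v hv => hg v (by simp [hv]))
    simp only [List.flatMap_cons]
    by_cases hd : u.head? = some '.'
    · rw [if_pos hd]
      simp only [List.nil_append, List.append_assoc]
      rw [pvRepl_token ',' u _ hgu.2, ihr]
      rw [if_pos (Or.inl hd)]
      simp
    · rw [if_neg hd]
      simp only [List.cons_append, List.nil_append, List.append_assoc]
      rw [pvRepl_sep_token ',' u _ hgu, ihr]
      by_cases hc : u.head? = some ','
      · rw [if_pos hc, if_pos (Or.inr hc)]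
        simp
      · rw [if_neg hc, if_neg (by simp [hd, hc])]
        simp


theorem pvSplit_go_good : ∀ (l cur : List Char) (acc : List (List Char)),
    (∀ u ∈ acc, pvGood u) → (∀ c ∈ cur, c ≠ ' ') →
    ∀ u ∈ PySem.Chars.split₀.go l cur acc, pvGood u := by
  intro l
  induction l with
  | nil =>
    intro cur acc hacc hcur u hu
    simp only [PySem.Chars.split₀.go] at hu
    split at hu
    · rename_i he
      exact hacc u (List.mem_reverse.mp hu)
    · rename_i he
      rw [List.reverse_cons] at hu
      -- hu : u ∈ acc.reverse ++ [cur.reverse]  (from (cur.reverse :: acc).reverse)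
      rcases List.mem_append.mp hu with h | h
      · exact hacc u (List.mem_reverse.mp h)
      · have : u = cur.reverse := by simpa using h
        subst this
        constructor
        · simp only [ne_eq, List.reverse_eq_nil_iff]
          intro hnil; subst hnil; simp at he
        · intro c hc; exact hcur c (List.mem_reverse.mp hc)
  | cons c t ih =>
    intro cur acc hacc hcur u hu
    simp only [PySem.Chars.split₀.go] at hu
    split at hu
    · split at hu
      · exact ih [] acc hacc (by simp) u hu
      · rename_i hsp he
        refine ih [] _ ?_ (by simp) u hu
        intro v hv
        rcases List.mem_cons.mp hv with h | h
        · subst h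
          constructor
          · simp only [ne_eq, List.reverse_eq_nil_iff]
            intro hnil; subst hnil; simp at he
          · intro d hd; exact hcur d (List.mem_reverse.mp hd)
        · exact hacc v h
    · rename_i hsp
      refine ih (c :: cur) acc hacc ?_ u hu
      intro d hd
      rcases List.mem_cons.mp hd with h | h
      · subst h
        intro he; subst he; simp [PySem.Chars.isspace] at hsp
      · exact hcur d h

theorem pvSplit_good (l : List Char) : ∀ u ∈ PySem.Chars.split₀ l, pvGood u := by
  intro u hu
  exact pvSplit_go_good l [] [] (by simp) (by simp) u hu


-- indexing helpers
theorem pvGet_zero {α : Type} (u : List α) : PySem.List.pyGet? u 0 = u.head? := by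
  cases u with
  | nil => simp [PySem.List.pyGet?, PySem.List.pyIdx?]
  | cons a t => simp [PySem.List.pyGet?, PySem.List.pyIdx?]

theorem pvGet_neg_one {α : Type} (u : List α) : PySem.List.pyGet? u (-1) = u.getLast? := by
  cases u with
  | nil => simp [PySem.List.pyGet?, PySem.List.pyIdx?]
  | cons a t =>
    rw [List.getLast?_eq_getElem?]
    simp [PySem.List.pyGet?, PySem.List.pyIdx?]

theorem pvPartial_length (ss : List (List Char)) (k : Nat) : (pvPartial ss k).length = ss.length := by
  simp [pvPartial]

theorem pvPartial_getElem? (ss : List (List Char)) (k j : Nat) (hj : j < ss.length) :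
    (pvPartial ss k)[j]? = some (if j ≤ k + 1 then normTok ss j else ss.getD j []) := by
  simp [pvPartial, hj]

-- the last character of a (possibly recapitalized) token is '.' iff the original token ends in '.'
theorem pvNormTok_last_dot (ss : List (List Char)) (i : Nat) :
    (normTok ss i).getLast? = some '.' ↔ PySem.Chars.endswith (ss.getD i []) ['.'] = true := by
  rw [pv_endswith_dot]
  unfold normTok
  split
  · rename_i h; subst h; exact pvCap_getLast?_dot _
  · split
    · exact pvCap_getLast?_dot _
    · exact Iff.rfl

theorem pvNormTok_good (ss : List (List Char)) (hg : ∀ u ∈ ss, pvGood u) (i : Nat) (hi : i < ss.length) :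
    pvGood (normTok ss i) := by
  have hmem : ∀ j : Nat, j < ss.length → pvGood (ss.getD j []) := by
    intro j hj
    rw [List.getD_eq_getElem ss [] hj]
    exact hg _ (List.getElem_mem hj)
  unfold normTok
  split
  · rename_i h; subst h; exact pvCap_good (hmem 0 hi)
  · split
    · exact pvCap_good (hmem i hi)
    · exact hmem i hi

-- one iteration of A's loop
theorem pvStepA (ss : List (List Char)) (hg : ∀ u ∈ ss, pvGood u) (k : Nat) (hk : k + 1 < ss.length) :
    unlexStepA (pvPartial ss k) ((k : Int) + 1) = pvPartial ss (k + 1) := by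
  have hn := pvPartial_length ss k
  have e2 : ((k : Int) + 1) = (((k + 1 : Nat)) : Int) := by push_cast; ring
  have hget : PySem.List.pyGet? (pvPartial ss k) ((k : Int) + 1) = some (normTok ss (k + 1)) := by
    rw [e2, PySem.List.pyGet?_natCast, pvPartial_getElem? ss k (k+1) hk]
    simp
  have hgood : pvGood (normTok ss (k+1)) := pvNormTok_good ss hg (k+1) hk
  have hslice : PySem.List.slice (pvPartial ss k) (some ((k : Int) + 1 + 1)) none =
      List.drop (k + 2) (pvPartial ss k) := by
    have h0 : (0:Int) ≤ (k : Int) + 1 + 1 := by omega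
    rw [PySem.List.slice_from _ h0]
    have ht : ((k : Int) + 1 + 1).toNat = k + 2 := by omega
    rw [ht]
  have hdrop : (List.drop (k + 2) (pvPartial ss k) = []) ↔ ss.length ≤ k + 2 := by
    rw [List.drop_eq_nil_iff, hn]
  unfold unlexStepA
  simp only [hget]
  cases hlast : (normTok ss (k+1)).getLast? with
  | none => exact absurd (List.getLast?_eq_none_iff.mp hlast) hgood.1
  | some c =>
    simp only [pvGet_neg_one, hlast]
    by_cases hcond : c = '.' ∧ ¬ ss.length ≤ k + 2
    · -- the next token gets capitalized
      obtain ⟨hc, hlt⟩ := hcond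
      have hk2 : k + 2 < ss.length := by omega
      rw [if_pos ⟨hc, by rw [hslice]; intro hnil; exact hlt (hdrop.mp hnil)⟩]
      have hget2 : PySem.List.pyGet? (pvPartial ss k) ((k : Int) + 1 + 1) = some (ss.getD (k+2) []) := by
        have e3 : ((k : Int) + 1 + 1) = (((k + 2 : Nat)) : Int) := by push_cast; ring
        rw [e3, PySem.List.pyGet?_natCast, pvPartial_getElem? ss k (k+2) hk2]
        have : ¬ (k + 2 ≤ k + 1) := by omega
        simp [this]
      simp only [hget2]
      have hdot : PySem.Chars.endswith (ss.getD (k+1) []) ['.'] = true := by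
        rw [← pvNormTok_last_dot, hlast, hc]
      have htoNat : ((k : Int) + 1 + 1).toNat = k + 2 := by omega
      rw [htoNat]
      apply List.ext_getElem
      · simp [pvPartial]
      · intro j hj1 hj2
        rw [List.getElem_set]
        have hjn : j < ss.length := by
          have := hj2; rw [pvPartial_length] at this; exact this
        have hl : ∀ m : Nat, (pvPartial ss m)[j]'(by rw [pvPartial_length]; exact hjn) = if j ≤ m + 1 then normTok ss j else ss.getD j [] := by
          intro m
          have := pvPartial_getElem? ss m j hjn
          rw [List.getElem?_eq_getElem (by rw [pvPartial_length]; exact hjn)] at this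
          simpa using this
        rw [hl k, hl (k+1)]
        by_cases hjk : k + 2 = j
        · subst hjk
          rw [if_pos rfl, if_pos (by omega)]
          unfold normTok
          have h1 : ¬ (k + 2 = 0) := by omega
          have h2 : k + 2 - 1 = k + 1 := by omega
          rw [if_neg h1, h2, if_pos ⟨by omega, hdot⟩]
        · rw [if_neg hjk]
          have : (j ≤ k + 1) ↔ (j ≤ k + 1 + 1) := by omega
          by_cases hle : j ≤ k + 1
          · rw [if_pos hle, if_pos (by omega)]
          · rw [if_neg hle, if_neg (by omega)]
    · -- nothing happens; positions k+2 is untouched (either out of range or not capitalized)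
      rw [if_neg (by
        intro hand
        obtain ⟨hc, hne⟩ := hand
        rw [hslice] at hne
        exact hcond ⟨hc, fun hle => hne (hdrop.mpr hle)⟩)]
      apply List.ext_getElem
      · simp [pvPartial]
      · intro j hj1 hj2
        have hjn : j < ss.length := by
          have := hj1; rw [pvPartial_length] at this; exact this
        have hl : ∀ m : Nat, (pvPartial ss m)[j]'(by rw [pvPartial_length]; exact hjn) = if j ≤ m + 1 then normTok ss j else ss.getD j [] := by
          intro m
          have := pvPartial_getElem? ss m j hjn
          rw [List.getElem?_eq_getElem (by rw [pvPartial_length]; exact hjn)] at this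
          simpa using this
        rw [hl k, hl (k+1)]
        by_cases hjk : j = k + 2
        · subst hjk
          have hk2 : k + 2 < ss.length := hjn
          have hc : ¬ c = '.' := fun h => hcond ⟨h, by omega⟩
          rw [if_neg (by omega), if_pos (by omega)]
          unfold normTok
          have h1 : ¬ (k + 2 = 0) := by omega
          have h2 : k + 2 - 1 = k + 1 := by omega
          rw [if_neg h1, h2, if_neg (by
            rintro ⟨-, hdot⟩
            exact hc (by
              have := (pvNormTok_last_dot ss (k+1)).mpr hdot
              rw [hlast] at this
              exact (Option.some.injEq _ _).mp this))]
        · by_cases hle : j ≤ k + 1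
          · rw [if_pos hle, if_pos (by omega)]
          · rw [if_neg hle, if_neg (by omega)]

theorem pvLoopA (ss : List (List Char)) (hg : ∀ u ∈ ss, pvGood u) :
    ∀ k : Nat, k + 1 ≤ ss.length →
    (PySem.List.pyRange 1 ((k : Int) + 1) 1).foldl unlexStepA (pvPartial ss 0) = pvPartial ss k := by
  intro k
  induction k with
  | zero =>
    intro _
    have h : PySem.List.pyRange 1 ((0 : Int) + 1) 1 = [] := by decide
    simp only [Nat.cast_zero]
    rw [h]; rfl
  | succ k ih =>
    intro hk
    have h1 : ((k + 1 : Nat) : Int) + 1 = ((k : Int) + 1) + 1 := by push_cast; ring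
    rw [h1, PySem.List.pyRange_one_succ_right (by omega), List.foldl_append]
    rw [ih (by omega)]
    simpa using pvStepA ss hg k (by omega)

-- one iteration of B's loop
theorem pvStepB (ss : List (List Char)) (hg : ∀ u ∈ ss, pvGood u) (k : Nat) (hk : k + 1 < ss.length)
    (out : List (List Char)) :
    unlexStepB ss out ((k : Int) + 1) =
      out ++ ((if (normTok ss (k+1)).head? = some '.' ∨ (normTok ss (k+1)).head? = some ',' then [] else [[' ']]) ++ [normTok ss (k+1)]) := by
  have hk1 : k < ss.length := by omega
  have e1 : ((k : Int) + 1 - 1) = ((k : Nat) : Int) := by ring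
  have e2 : ((k : Int) + 1) = (((k + 1 : Nat)) : Int) := by push_cast; ring
  have tk : pvTok ss ((k : Nat) : Int) = ss.getD k [] := by
    simp [pvTok, PySem.List.pyGet?_natCast, List.getElem?_eq_getElem hk1]
  have tk1 : pvTok ss (((k + 1 : Nat)) : Int) = ss.getD (k+1) [] := by
    rw [pvTok, PySem.List.pyGet?_natCast]
    rw [List.getElem?_eq_getElem hk, List.getD_eq_getElem ss [] hk]
    rfl
  have hnt : (if 2 ≤ (k : Int) + 1 ∧ PySem.Chars.endswith (pvTok ss ((k : Int) + 1 - 1)) ['.'] = true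
      then pvCap (pvTok ss ((k : Int) + 1)) else pvTok ss ((k : Int) + 1)) = normTok ss (k + 1) := by
    rw [e1, e2, tk, tk1]
    unfold normTok
    have hne : ¬ (k + 1 = 0) := by omega
    rw [if_neg hne]
    have : k + 1 - 1 = k := by omega
    rw [this]
    by_cases h1 : 1 ≤ k
    · have c1 : (2 ≤ (k : Int) + 1) := by omega
      have c2 : (2 ≤ k + 1) := by omega
      by_cases he : PySem.Chars.endswith (ss.getD k []) ['.'] = true
      · rw [if_pos ⟨c1, he⟩, if_pos ⟨c2, he⟩]
      · rw [if_neg (by tauto), if_neg (by tauto)]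
    · have c1 : ¬ (2 ≤ (k : Int) + 1) := by omega
      have c2 : ¬ (2 ≤ k + 1) := by omega
      rw [if_neg (by tauto), if_neg (by tauto)]
  have hgood : pvGood (normTok ss (k+1)) := pvNormTok_good ss hg (k+1) hk
  unfold unlexStepB
  simp only [hnt]
  rw [pvGet_zero]
  cases hh : (normTok ss (k+1)).head? with
  | none =>
    exact absurd (List.head?_eq_none_iff.mp hh) hgood.1
  | some c =>
    by_cases hc : c = '.' ∨ c = ','
    · rcases hc with h | h <;> subst h <;> simp
    · rw [not_or] at hc
      simp [hc.1, hc.2]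

theorem pvLoopB (ss : List (List Char)) (hg : ∀ u ∈ ss, pvGood u) :
    ∀ k : Nat, k + 1 ≤ ss.length →
    (PySem.List.pyRange 1 ((k : Int) + 1) 1).foldl (unlexStepB ss) [pvCap (ss.getD 0 [])] =
      [pvCap (ss.getD 0 [])] ++ (List.range' 1 k).flatMap
        (fun j => (if (normTok ss j).head? = some '.' ∨ (normTok ss j).head? = some ',' then [] else [[' ']]) ++ [normTok ss j]) := by
  intro k
  induction k with
  | zero =>
    intro _
    have h : PySem.List.pyRange 1 ((0 : Int) + 1) 1 = [] := by decide
    simp only [Nat.cast_zero]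
    rw [h]; rfl
  | succ k ih =>
    intro hk
    have h1 : ((k + 1 : Nat) : Int) + 1 = ((k : Int) + 1) + 1 := by push_cast; ring
    rw [h1, PySem.List.pyRange_one_succ_right (by omega), List.foldl_append]
    rw [ih (by omega)]
    simp only [List.foldl_cons, List.foldl_nil]
    rw [pvStepB ss hg k (by omega)]
    rw [List.range'_1_concat]
    rw [Nat.add_comm 1 k]
    simp


theorem pvPartial_zero (t0 : List Char) (ts : List (List Char)) :
    pvPartial (t0 :: ts) 0 = pvCap t0 :: ts := by
  apply List.ext_getElem
  · simp [pvPartial]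
  · intro j hj1 hj2
    have hjn : j < (t0 :: ts).length := by rw [pvPartial_length] at hj1; exact hj1
    have hl := pvPartial_getElem? (t0 :: ts) 0 j hjn
    rw [List.getElem?_eq_getElem hj1] at hl
    have hl2 : (pvPartial (t0 :: ts) 0)[j] = if j ≤ 0 + 1 then normTok (t0 :: ts) j else (t0 :: ts).getD j [] := by
      simpa using hl
    rw [hl2]
    cases j with
    | zero =>
      simp [normTok]
    | succ m =>
      cases m with
      | zero =>
        have : normTok (t0 :: ts) 1 = (t0 :: ts).getD 1 [] := by
          unfold normTok
          rw [if_neg (by omega), if_neg (by rintro ⟨h, -⟩; omega)]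
        simp only [this]
        have h0 : 0 < ts.length := by simp at hjn; omega
        simp [List.getElem?_eq_getElem h0]
      | succ i =>
        rw [if_neg (by omega)]
        have h0 : i + 1 < ts.length := by simp at hjn; omega
        simp [List.getElem?_eq_getElem h0]

theorem pvPartial_full (ss : List (List Char)) :
    pvPartial ss (ss.length - 1) = (List.range ss.length).map (normTok ss) := by
  unfold pvPartial
  apply List.map_congr_left
  intro j hj
  rw [List.mem_range] at hj
  rw [if_pos (by omega)]

theorem pvJoin_nil_flatten (l : List (List Char)) : PySem.Chars.join [] l = l.flatten := by
  induction l with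
  | nil => simp [PySem.Chars.join_nil]
  | cons a t ih =>
    cases t with
    | nil => simp [PySem.Chars.join_singleton]
    | cons b r =>
      rw [PySem.Chars.join_cons_cons, ih]
      simp

theorem pvFlatten_seg (js : List Nat) (g : Nat → List Char) :
    (js.flatMap (fun j => (if (g j).head? = some '.' ∨ (g j).head? = some ',' then [] else [[' ']]) ++ [g j])).flatten =
      js.flatMap (fun j => (if (g j).head? = some '.' ∨ (g j).head? = some ',' then [] else [' ']) ++ g j) := by
  induction js with
  | nil => simp
  | cons j t ih =>
    simp only [List.flatMap_cons, List.flatten_append]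
    rw [ih]
    by_cases h : (g j).head? = some '.' ∨ (g j).head? = some ','
    · rw [if_pos h, if_pos h]; simp
    · rw [if_neg h, if_neg h]; simp

-- ===== VERDICT (by name: the statement is the Claim_ definition above) =====
theorem unlex_spec : Claim_equal_unlex := by
  unfold Claim_equal_unlex Spec_unlex
  intro s _ hpre
  have hbridge := PySem.Str.split₀_map_toList s
  have hLne : PySem.Chars.split₀ s.toList ≠ [] := by
    rw [← hbridge]
    simp only [ne_eq, List.map_eq_nil_iff]
    exact hpre
  cases hL : PySem.Chars.split₀ s.toList with
  | nil => exact absurd hL hLne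
  | cons t0 ts =>
    have hg : ∀ u ∈ (t0 :: ts), pvGood u := by
      rw [← hL]; exact pvSplit_good s.toList
    set ss : List (List Char) := t0 :: ts with hss
    have hn1 : 1 ≤ ss.length := by simp [hss]
    have hcast : (((ss.length - 1 : Nat)) : Int) + 1 = (ss.length : Int) := by
      omega
    have hget0 : PySem.List.pyGet? ss 0 = some t0 := by
      rw [pvGet_zero]; rfl
    have hgetD0 : ss.getD 0 [] = t0 := rfl
    -- normalized token lists
    have hN : (List.range ss.length).map (normTok ss) =
        normTok ss 0 :: (List.range' 1 (ss.length - 1)).map (normTok ss) := by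
      conv_lhs => rw [show ss.length = (ss.length - 1) + 1 by omega]
      rw [List.range_eq_range', List.range'_succ]
      simp
    have hN0 : normTok ss 0 = pvCap t0 := by
      unfold normTok; rw [if_pos rfl, hgetD0]
    have hgoodN : ∀ u ∈ (List.range' 1 (ss.length - 1)).map (normTok ss), pvGood u := by
      intro u hu
      rw [List.mem_map] at hu
      obtain ⟨j, hj, rfl⟩ := hu
      rw [List.mem_range'_1] at hj
      exact pvNormTok_good ss hg j (by omega)
    have hgood0 : pvGood (pvCap t0) := by
      rw [← hN0]; exact pvNormTok_good ss hg 0 (by omega)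
    -- A's side
    have hA : unlex s = String.ofList (pvCap t0 ++
        (List.range' 1 (ss.length - 1)).flatMap (fun j => pvPiece (normTok ss j))) := by
      show (let ssl := PySem.Chars.split₀ s.toList
        match PySem.List.pyGet? ssl 0 with
        | none => ""
        | some t0 =>
          let ss1 := ssl.set 0 (pvCap t0)
          let ss2 := (PySem.List.pyRange 1 (ss1.length : Int) 1).foldl unlexStepA ss1
          let r1 := PySem.Chars.join [' '] ss2
          let r2 := PySem.Chars.replace r1 [' ', '.'] ['.']
          let r3 := PySem.Chars.replace r2 [' ', ','] [',']
          String.ofList r3) = _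
      simp only [hL, hget0]
      have hset : (t0 :: ts).set 0 (pvCap t0) = pvCap t0 :: ts := rfl
      have hlen : (pvCap t0 :: ts).length = ss.length := by simp [hss]
      rw [hset, hlen, ← pvPartial_zero t0 ts, ← hss]
      rw [← hcast, pvLoopA ss hg (ss.length - 1) (by omega), pvPartial_full ss, hN, hN0]
      rw [pvJoin_space]
      show String.ofList (pvRepl ',' (pvRepl '.' _)) = _
      rw [pvRepl_token '.' _ _ hgood0.2, pvPass1 _ hgoodN]
      rw [pvRepl_token ',' _ _ hgood0.2, pvPass2 _ hgoodN]
      rw [List.flatMap_map]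
      rfl
    -- B's side
    have hB : unlex_alt s = String.ofList (pvCap t0 ++
        (List.range' 1 (ss.length - 1)).flatMap (fun j => pvPiece (normTok ss j))) := by
      show (match PySem.Chars.split₀ s.toList with
        | [] => ""
        | t0 :: ts =>
          let ss := t0 :: ts
          let out := (PySem.List.pyRange 1 (ss.length : Int) 1).foldl (unlexStepB ss) [pvCap t0]
          String.ofList (PySem.Chars.join [] out)) = _
      simp only [hL]
      show String.ofList (PySem.Chars.join []
        ((PySem.List.pyRange 1 (ss.length : Int) 1).foldl (unlexStepB ss) [pvCap t0])) = _
      rw [← hgetD0, ← hcast, pvLoopB ss hg (ss.length - 1) (by omega)]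
      rw [pvJoin_nil_flatten, List.flatten_append]
      rw [pvFlatten_seg (List.range' 1 (ss.length - 1)) (normTok ss)]
      simp [pvPiece]
    rw [hA, hB]
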